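-- pv_equiv track=rewrite | github.com/jessepdx/fedcamp | normalize.py | parse_site_access
-- ===== SOURCE A (Python) =====
-- def parse_site_access(val):
--     if val is None:
--         return None
--     v = val.strip().lower()
--     if not v or v == 'n/a':
--         return None
--     # Handle comma-separated multi-access
--     parts = [p.strip() for p in v.split(',')]
--     # Priority: drive > walk > bike > hike > boat
--     access_map = {
--         'drive-in': 'DRIVE_IN', 'drive in': 'DRIVE_IN', 'drive-up': 'DRIVE_IN',
--         'walk-in': 'WALK_IN',
--         'bike': 'BIKE',
--         'hike-in': 'HIKE_IN', 'hike in': 'HIKE_IN',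
--         'boat-in': 'BOAT_IN', 'boat in': 'BOAT_IN',
--     }
--     priority = ['DRIVE_IN', 'WALK_IN', 'BIKE', 'HIKE_IN', 'BOAT_IN']
--     found = set()
--     for p in parts:
--         mapped = access_map.get(p)
--         if mapped:
--             found.add(mapped)
--     if not found:
--         return None
--     for prio in priority:
--         if prio in found:
--             return prio
--     return None
-- ===== SOURCE B (Python) =====
-- def parse_site_access(val):
--     if val is None:
--         return None
--     v = val.strip().lower()
--     if not v or v == 'n/a':
--         return None
--     priority = ['DRIVE_IN', 'WALK_IN', 'BIKE', 'HIKE_IN', 'BOAT_IN']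
--     # token -> priority rank, directly (lower rank = higher priority)
--     rank = {
--         'drive-in': 0, 'drive in': 0, 'drive-up': 0,
--         'walk-in': 1,
--         'bike': 2,
--         'hike-in': 3, 'hike in': 3,
--         'boat-in': 4, 'boat in': 4,
--     }
--     best = None
--     for p in v.split(','):
--         r = rank.get(p.strip())
--         if r is not None and (best is None or r < best):
--             best = r
--     return priority[best] if best is not None else None
-- ===== Notes on version B (the rewrite author's own statement) =====
-- stated objective: simpler
-- what changed: Instead of A's two phases (build a set of mapped access values, then scan the priority list for the first member), B maps each comma token straight to its priority rank and keeps the minimum rank in a single pass, indexing the priority list once at the end.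
import Mathlib
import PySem

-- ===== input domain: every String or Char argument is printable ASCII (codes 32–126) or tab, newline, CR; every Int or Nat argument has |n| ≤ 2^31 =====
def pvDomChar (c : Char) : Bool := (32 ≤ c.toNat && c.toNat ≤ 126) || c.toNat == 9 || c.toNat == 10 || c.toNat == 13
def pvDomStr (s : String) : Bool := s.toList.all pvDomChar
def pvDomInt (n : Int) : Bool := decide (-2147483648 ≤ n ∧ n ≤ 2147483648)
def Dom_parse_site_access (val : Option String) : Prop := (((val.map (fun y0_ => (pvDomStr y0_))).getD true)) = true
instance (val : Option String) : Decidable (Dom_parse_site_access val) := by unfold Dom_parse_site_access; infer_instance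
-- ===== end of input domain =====

-- B replaces A's two-phase "collect mapped values into a set, then scan the priority list"
-- with a single pass keeping the minimum priority rank seen (objective: simpler).

-- ===== PORT A =====
def pvAccessMap : PySem.Dict String String := PySem.Dict.ofList
  [("drive-in","DRIVE_IN"),("drive in","DRIVE_IN"),("drive-up","DRIVE_IN"),
   ("walk-in","WALK_IN"),("bike","BIKE"),
   ("hike-in","HIKE_IN"),("hike in","HIKE_IN"),
   ("boat-in","BOAT_IN"),("boat in","BOAT_IN")]

def pvPriority : List String := ["DRIVE_IN","WALK_IN","BIKE","HIKE_IN","BOAT_IN"]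

-- loop body of A's 'for p in parts'
def pvStepA (f : PySem.Set String) (p : String) : PySem.Set String :=
  match PySem.Dict.get? pvAccessMap p with
  | some m => if m = "" then f else PySem.Set.add f m   -- 'if mapped:' truthiness (None and '' falsy)
  | none => f

-- 'for prio in priority: if prio in found: return prio'
def pvFirstIn : List String → PySem.Set String → Option String
  | [], _ => none
  | q :: rest, found => if PySem.Set.contains found q then some q else pvFirstIn rest found

def parse_site_access (val : Option String) : Option String :=
  match val with
  | none => none
  | some s =>
    let v := PySem.Str.lower (PySem.Str.strip s)
    if v = "" ∨ v = "n/a" then none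
    else
      let parts := ((PySem.Str.split? v ",").getD []).map PySem.Str.strip  -- sep "," ≠ "": split? is always some
      let found : PySem.Set String := parts.foldl pvStepA PySem.Set.empty
      if found = [] then none
      else pvFirstIn pvPriority found

-- ===== PORT B =====
def pvRank : PySem.Dict String Int := PySem.Dict.ofList
  [("drive-in",0),("drive in",0),("drive-up",0),
   ("walk-in",1),("bike",2),
   ("hike-in",3),("hike in",3),
   ("boat-in",4),("boat in",4)]

-- loop body of B's 'for p in v.split(',')'
def pvStepB (best : Option Int) (p : String) : Option Int :=
  match PySem.Dict.get? pvRank (PySem.Str.strip p) with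
  | some r =>
      match best with
      | none => some r
      | some b => if r < b then some r else some b
  | none => best

def parse_site_access_alt (val : Option String) : Option String :=
  match val with
  | none => none
  | some s =>
    let v := PySem.Str.lower (PySem.Str.strip s)
    if v = "" ∨ v = "n/a" then none
    else
      let best : Option Int := ((PySem.Str.split? v ",").getD []).foldl pvStepB none  -- sep "," ≠ "": split? is always some
      match best with
      | some b => PySem.List.pyGet? pvPriority b   -- priority[best]; best ∈ {0..4} whenever set
      | none => none

-- ===== PRECONDITION & SPEC =====
def Spec_parse_site_access (val : Option String) (out : Option String) : Prop := out = parse_site_access_alt val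
instance (val : Option String) (out : Option String) : Decidable (Spec_parse_site_access val out) := by unfold Spec_parse_site_access; infer_instance

-- ===== CLAIM (what is proved, stated in full; the proofs are below) =====
def Claim_equal_parse_site_access : Prop := ∀ (val : Option String), Dom_parse_site_access val → Spec_parse_site_access val (parse_site_access val)

-- ===== LEMMAS AND PROOFS =====

-- per-token classification: the two literal dicts, key by key
theorem pvTok (p : String) :
    (PySem.Dict.get? pvAccessMap p = none ∧ PySem.Dict.get? pvRank p = none) ∨
    (PySem.Dict.get? pvAccessMap p = some "DRIVE_IN" ∧ PySem.Dict.get? pvRank p = some 0) ∨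
    (PySem.Dict.get? pvAccessMap p = some "WALK_IN" ∧ PySem.Dict.get? pvRank p = some 1) ∨
    (PySem.Dict.get? pvAccessMap p = some "BIKE" ∧ PySem.Dict.get? pvRank p = some 2) ∨
    (PySem.Dict.get? pvAccessMap p = some "HIKE_IN" ∧ PySem.Dict.get? pvRank p = some 3) ∨
    (PySem.Dict.get? pvAccessMap p = some "BOAT_IN" ∧ PySem.Dict.get? pvRank p = some 4) := by
  have hA : pvAccessMap = PySem.Dict.mk [("drive-in","DRIVE_IN"),("drive in","DRIVE_IN"),("drive-up","DRIVE_IN"),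
   ("walk-in","WALK_IN"),("bike","BIKE"),("hike-in","HIKE_IN"),("hike in","HIKE_IN"),
   ("boat-in","BOAT_IN"),("boat in","BOAT_IN")] := by decide
  have hR : pvRank = PySem.Dict.mk [("drive-in",0),("drive in",0),("drive-up",0),
   ("walk-in",1),("bike",2),("hike-in",3),("hike in",3),("boat-in",4),("boat in",4)] := by decide
  rw [hA, hR]
  simp only [PySem.Dict.get?_mk_cons]
  split_ifs <;> simp_all [PySem.Dict.get?]

-- "some token of parts has rank i"
abbrev pvH (parts : List String) (i : Int) : Prop := ∃ p ∈ parts, PySem.Dict.get? pvRank p = some i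

-- the minimum rank over a token list (B's loop, 'min' made explicit)
def pvOmin : Option Int → Option Int → Option Int
  | none, b => b
  | some a, none => some a
  | some a, some b => some (min a b)

def pvMu : List String → Option Int
  | [] => none
  | q :: rest => pvOmin (PySem.Dict.get? pvRank q) (pvMu rest)

theorem pvOmin_none_right (a : Option Int) : pvOmin a none = a := by cases a <;> rfl

theorem pvOmin_assoc (a b c : Option Int) : pvOmin (pvOmin a b) c = pvOmin a (pvOmin b c) := by
  cases a <;> cases b <;> cases c <;> simp [pvOmin, min_assoc]

theorem pvStepB_eq (b : Option Int) (p : String) :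
    pvStepB b p = pvOmin b (PySem.Dict.get? pvRank (PySem.Str.strip p)) := by
  cases h : PySem.Dict.get? pvRank (PySem.Str.strip p) <;> cases b <;>
    simp [pvStepB, pvOmin, h, min_def] <;> split_ifs <;> first | rfl | omega

theorem pvFoldB (toks : List String) (b0 : Option Int) :
    toks.foldl pvStepB b0 = pvOmin b0 (pvMu (toks.map PySem.Str.strip)) := by
  induction toks generalizing b0 with
  | nil => simp [pvMu, pvOmin_none_right]
  | cons q rest ih =>
      simp only [List.foldl_cons, List.map_cons, ih, pvStepB_eq, pvMu, pvOmin_assoc]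

theorem pvMu_attained (parts : List String) (i : Int) (h : pvMu parts = some i) : pvH parts i := by
  induction parts with
  | nil => simp [pvMu] at h
  | cons q rest ih =>
      rw [pvMu] at h
      cases hq : PySem.Dict.get? pvRank q with
      | none =>
          rw [hq] at h
          obtain ⟨p, hp, hpr⟩ := ih h
          exact ⟨p, List.mem_cons_of_mem _ hp, hpr⟩
      | some a =>
          cases hm : pvMu rest with
          | none =>
              rw [hq, hm] at h
              have h' : a = i := Option.some.inj h
              exact ⟨q, List.mem_cons_self, by rw [hq, h']⟩
          | some b =>
              rw [hq, hm] at h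
              have h : min a b = i := Option.some.inj h
              rcases le_total a b with hab | hab
              · exact ⟨q, List.mem_cons_self, by rw [hq]; congr 1; omega⟩
              · obtain ⟨p, hp, hpr⟩ := ih (by rw [hm]; congr 1; omega)
                exact ⟨p, List.mem_cons_of_mem _ hp, hpr⟩

theorem pvMu_lb (parts : List String) (i : Int) (h : pvH parts i) :
    ∃ j, pvMu parts = some j ∧ j ≤ i := by
  induction parts with
  | nil => obtain ⟨p, hp, _⟩ := h; simp at hp
  | cons q rest ih =>
      obtain ⟨p, hp, hpr⟩ := h
      rcases List.mem_cons.mp hp with rfl | hp'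
      · rw [pvMu, hpr]
        cases hm : pvMu rest with
        | none => exact ⟨i, rfl, le_refl i⟩
        | some b => exact ⟨min i b, rfl, min_le_left i b⟩
      · obtain ⟨j, hm, hj⟩ := ih ⟨p, hp', hpr⟩
        rw [pvMu, hm]
        cases hq : PySem.Dict.get? pvRank q with
        | none => exact ⟨j, rfl, hj⟩
        | some a => exact ⟨min a j, rfl, le_trans (min_le_right a j) hj⟩

theorem pvH_range (parts : List String) (i : Int) (h : pvH parts i) :
    i = 0 ∨ i = 1 ∨ i = 2 ∨ i = 3 ∨ i = 4 := by
  obtain ⟨p, _, hpr⟩ := h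
  rcases pvTok p with ⟨_, hR⟩ | ⟨_, hR⟩ | ⟨_, hR⟩ | ⟨_, hR⟩ | ⟨_, hR⟩ | ⟨_, hR⟩ <;> rw [hR] at hpr <;>
    simp_all

theorem pvMu_eq_of (parts : List String) (i : Int) (hi : pvH parts i)
    (hmin : ∀ j, pvH parts j → i ≤ j) : pvMu parts = some i := by
  obtain ⟨j, hm, hj⟩ := pvMu_lb parts i hi
  have h1 := hmin j (pvMu_attained parts j hm)
  have : j = i := by omega
  rw [hm, this]

-- the two dicts agree token by token
theorem pvAR (p : String) :
    (PySem.Dict.get? pvAccessMap p = some "DRIVE_IN" ↔ PySem.Dict.get? pvRank p = some 0) ∧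
    (PySem.Dict.get? pvAccessMap p = some "WALK_IN" ↔ PySem.Dict.get? pvRank p = some 1) ∧
    (PySem.Dict.get? pvAccessMap p = some "BIKE" ↔ PySem.Dict.get? pvRank p = some 2) ∧
    (PySem.Dict.get? pvAccessMap p = some "HIKE_IN" ↔ PySem.Dict.get? pvRank p = some 3) ∧
    (PySem.Dict.get? pvAccessMap p = some "BOAT_IN" ↔ PySem.Dict.get? pvRank p = some 4) := by
  rcases pvTok p with ⟨hA, hR⟩ | ⟨hA, hR⟩ | ⟨hA, hR⟩ | ⟨hA, hR⟩ | ⟨hA, hR⟩ | ⟨hA, hR⟩ <;>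
    rw [hA, hR] <;> simp

theorem pvMemFoldA (parts : List String) (acc : PySem.Set String) (x : String) :
    x ∈ parts.foldl pvStepA acc ↔ x ∈ acc ∨ ∃ p ∈ parts, PySem.Dict.get? pvAccessMap p = some x := by
  induction parts generalizing acc with
  | nil => simp
  | cons p rest ih =>
      rw [List.foldl_cons, ih]
      have hstep : x ∈ pvStepA acc p ↔ x ∈ acc ∨ PySem.Dict.get? pvAccessMap p = some x := by
        rcases pvTok p with ⟨hA, _⟩ | ⟨hA, _⟩ | ⟨hA, _⟩ | ⟨hA, _⟩ | ⟨hA, _⟩ | ⟨hA, _⟩ <;>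
          simp only [pvStepA, hA, PySem.Set.mem_add, Option.some.injEq, reduceCtorEq,
            or_false, reduceIte, String.reduceEq] <;> tauto
      rw [hstep]
      simp only [List.mem_cons]
      constructor
      · rintro ((h | h) | ⟨p', hp', h⟩)
        · exact .inl h
        · exact .inr ⟨p, .inl rfl, h⟩
        · exact .inr ⟨p', .inr hp', h⟩
      · rintro (h | ⟨p', (rfl | hp'), h⟩)
        · exact .inl (.inl h)
        · exact .inl (.inr h)
        · exact .inr ⟨p', hp', h⟩

-- the core equality: A's set-then-scan equals B's running minimum, for any token list
theorem pvCore (toks : List String) :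
    (if (toks.map PySem.Str.strip).foldl pvStepA PySem.Set.empty = [] then (none : Option String)
     else pvFirstIn pvPriority ((toks.map PySem.Str.strip).foldl pvStepA PySem.Set.empty))
    = match toks.foldl pvStepB none with
      | some b => PySem.List.pyGet? pvPriority b
      | none => none := by
  rw [pvFoldB]
  have hz : pvOmin none (pvMu (toks.map PySem.Str.strip)) = pvMu (toks.map PySem.Str.strip) := rfl
  rw [hz]
  set parts := toks.map PySem.Str.strip with hparts
  set found := parts.foldl pvStepA PySem.Set.empty with hfound
  have hmem : ∀ x, x ∈ found ↔ ∃ p ∈ parts, PySem.Dict.get? pvAccessMap p = some x := by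
    intro x
    rw [hfound, pvMemFoldA]
    simp [PySem.Set.empty]
  have hmem0 : "DRIVE_IN" ∈ found ↔ pvH parts 0 := by
    rw [hmem]; exact exists_congr fun p => and_congr_right fun _ => (pvAR p).1
  have hmem1 : "WALK_IN" ∈ found ↔ pvH parts 1 := by
    rw [hmem]; exact exists_congr fun p => and_congr_right fun _ => (pvAR p).2.1
  have hmem2 : "BIKE" ∈ found ↔ pvH parts 2 := by
    rw [hmem]; exact exists_congr fun p => and_congr_right fun _ => (pvAR p).2.2.1
  have hmem3 : "HIKE_IN" ∈ found ↔ pvH parts 3 := by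
    rw [hmem]; exact exists_congr fun p => and_congr_right fun _ => (pvAR p).2.2.2.1
  have hmem4 : "BOAT_IN" ∈ found ↔ pvH parts 4 := by
    rw [hmem]; exact exists_congr fun p => and_congr_right fun _ => (pvAR p).2.2.2.2
  by_cases h0 : pvH parts 0
  · have hμ : pvMu parts = some 0 := by
      refine pvMu_eq_of parts 0 h0 fun j hj => ?_
      rcases pvH_range parts j hj with rfl | rfl | rfl | rfl | rfl <;> decide
    rw [hμ]
    rw [if_neg (List.ne_nil_of_mem (hmem0.mpr h0))]
    simp [pvFirstIn, pvPriority, PySem.List.pyGet?, PySem.List.pyIdx?, hmem0, h0]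
  · by_cases h1 : pvH parts 1
    · have hμ : pvMu parts = some 1 := by
        refine pvMu_eq_of parts 1 h1 fun j hj => ?_
        rcases pvH_range parts j hj with rfl | rfl | rfl | rfl | rfl <;>
          first | exact absurd hj h0 | decide
      rw [hμ]
      rw [if_neg (List.ne_nil_of_mem (hmem1.mpr h1))]
      simp [pvFirstIn, pvPriority, PySem.List.pyGet?, PySem.List.pyIdx?, hmem0, hmem1, h0, h1]
    · by_cases h2 : pvH parts 2
      · have hμ : pvMu parts = some 2 := by
          refine pvMu_eq_of parts 2 h2 fun j hj => ?_
          rcases pvH_range parts j hj with rfl | rfl | rfl | rfl | rfl <;>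
            first | exact absurd hj h0 | exact absurd hj h1 | decide
        rw [hμ]
        rw [if_neg (List.ne_nil_of_mem (hmem2.mpr h2))]
        simp [pvFirstIn, pvPriority, PySem.List.pyGet?, PySem.List.pyIdx?, hmem0, hmem1, hmem2, h0, h1, h2]
      · by_cases h3 : pvH parts 3
        · have hμ : pvMu parts = some 3 := by
            refine pvMu_eq_of parts 3 h3 fun j hj => ?_
            rcases pvH_range parts j hj with rfl | rfl | rfl | rfl | rfl <;>
              first | exact absurd hj h0 | exact absurd hj h1 | exact absurd hj h2 | decide
          rw [hμ]
          rw [if_neg (List.ne_nil_of_mem (hmem3.mpr h3))]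
          simp [pvFirstIn, pvPriority, PySem.List.pyGet?, PySem.List.pyIdx?, hmem0, hmem1, hmem2, hmem3, h0, h1, h2, h3]
        · by_cases h4 : pvH parts 4
          · have hμ : pvMu parts = some 4 := by
              refine pvMu_eq_of parts 4 h4 fun j hj => ?_
              rcases pvH_range parts j hj with rfl | rfl | rfl | rfl | rfl <;>
                first | exact absurd hj h0 | exact absurd hj h1 | exact absurd hj h2 | exact absurd hj h3 | decide
            rw [hμ]
            rw [if_neg (List.ne_nil_of_mem (hmem4.mpr h4))]
            simp [pvFirstIn, pvPriority, PySem.List.pyGet?, PySem.List.pyIdx?, hmem0, hmem1, hmem2, hmem3, hmem4, h0, h1, h2, h3, h4]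
          · have hμ : pvMu parts = none := by
              cases hm : pvMu parts with
              | none => rfl
              | some j =>
                  exfalso
                  have hj := pvMu_attained parts j hm
                  rcases pvH_range parts j hj with rfl | rfl | rfl | rfl | rfl
                  · exact h0 hj
                  · exact h1 hj
                  · exact h2 hj
                  · exact h3 hj
                  · exact h4 hj
            rw [hμ]
            by_cases hf : found = []
            · simp [hf]
            · rw [if_neg hf]
              simp [pvFirstIn, pvPriority, hmem0, hmem1, hmem2, hmem3, hmem4, h0, h1, h2, h3, h4]

-- ===== VERDICT (by name: the statement is the Claim_ definition above) =====
theorem parse_site_access_spec : Claim_equal_parse_site_access := by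
  intro val _
  unfold Spec_parse_site_access
  cases val with
  | none => rfl
  | some s =>
      by_cases hg : PySem.Str.lower (PySem.Str.strip s) = "" ∨ PySem.Str.lower (PySem.Str.strip s) = "n/a"
      · simp [parse_site_access, parse_site_access_alt, hg]
      · simp only [parse_site_access, parse_site_access_alt, if_neg hg]
        exact pvCore ((PySem.Str.split? (PySem.Str.lower (PySem.Str.strip s)) ",").getD [])
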